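-- pv_equiv track=rewrite | github.com/Ark-Barua/CAPTRIX | app/core/win_devices.py | pick_default_mic
-- ===== SOURCE A (Python) =====
-- from typing import List
--
-- def pick_default_mic(audio_devices: List[str]) -> str | None:
--     if not audio_devices:
--         return None
--
--     for d in audio_devices:
--         lower = d.lower()
--         if "microphone" in lower or lower.startswith("mic ") or " mic" in lower:
--             return d
--
--     # Avoid selecting known loopback/system-output sources as microphone default.
--     for d in audio_devices:
--         if not _looks_like_system_audio_source(d):
--             return d
--
--     return audio_devices[0]
--
-- def _looks_like_system_audio_source(device_name: str) -> bool:
--     lower = device_name.lower()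
--     system_keywords = (
--         "stereo mix",
--         "what u hear",
--         "wave out",
--         "loopback",
--         "speaker",
--         "speakers",
--         "headphone",
--         "line out",
--         "digital output",
--     )
--     return any(keyword in lower for keyword in system_keywords)
-- ===== SOURCE B (Python) =====
-- from typing import List
--
-- _SYSTEM_KEYWORDS = (
--     "stereo mix",
--     "what u hear",
--     "wave out",
--     "loopback",
--     "speaker",
--     "speakers",
--     "headphone",
--     "line out",
--     "digital output",
-- )
--
-- def _mic_priority(device_name: str) -> int:
--     """0 = microphone-like name, 1 = plain (non-system) device, 2 = system/loopback source."""
--     lower = device_name.lower()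
--     if "microphone" in lower or lower.startswith("mic ") or " mic" in lower:
--         return 0
--     if not any(k in lower for k in _SYSTEM_KEYWORDS):
--         return 1
--     return 2
--
-- def pick_default_mic(audio_devices: List[str]) -> str | None:
--     if not audio_devices:
--         return None
--     # min is stable: the first device of the lowest priority class wins,
--     # which is exactly the staged preference order.
--     return min(audio_devices, key=_mic_priority)
-- ===== Notes on version B (the rewrite author's own statement) =====
-- stated objective: alternative
-- what changed: A's staged early-return scans (first mic-like name, then first non-system device, then the head) are replaced by a score-and-select algorithm: each device gets a priority 0/1/2 from one classifier and the result is min(audio_devices, key=priority), whose stability reproduces the staged preference order.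
import Mathlib
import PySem

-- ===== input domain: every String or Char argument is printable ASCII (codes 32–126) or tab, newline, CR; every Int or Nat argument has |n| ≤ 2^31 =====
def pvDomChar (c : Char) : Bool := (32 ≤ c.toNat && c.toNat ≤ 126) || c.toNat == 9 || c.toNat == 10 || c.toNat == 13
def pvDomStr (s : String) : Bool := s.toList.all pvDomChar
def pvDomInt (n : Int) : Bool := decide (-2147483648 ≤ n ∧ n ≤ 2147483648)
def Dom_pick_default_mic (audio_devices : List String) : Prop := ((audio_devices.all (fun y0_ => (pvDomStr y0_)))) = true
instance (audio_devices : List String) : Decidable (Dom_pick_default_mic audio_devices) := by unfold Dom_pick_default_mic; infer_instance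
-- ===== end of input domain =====

-- B replaces A's staged early-return scans by a priority classifier (0/1/2) plus a stable min-by-key selection; same cost, different algorithm.

-- ===== PORT A =====
def pvSystemKeywords : List String :=
  ["stereo mix", "what u hear", "wave out", "loopback", "speaker",
   "speakers", "headphone", "line out", "digital output"]

-- _looks_like_system_audio_source
def pvLooksLikeSystemAudioSource (device_name : String) : Bool :=
  let lower := PySem.Str.lower device_name
  pvSystemKeywords.any (fun k => PySem.Str.isIn k lower)

-- "microphone" in lower or lower.startswith("mic ") or " mic" in lower
def pvMicTest (lower : String) : Bool :=
  PySem.Str.isIn "microphone" lower || PySem.Str.startswith lower "mic " ||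
    PySem.Str.isIn " mic" lower

-- first loop of A: return first device whose lowered name passes pvMicTest
def pvLoopMic : List String → Option String
  | [] => none
  | d :: rest => if pvMicTest (PySem.Str.lower d) then some d else pvLoopMic rest

-- second loop of A: return first device that is not a system audio source
def pvLoopNonSys : List String → Option String
  | [] => none
  | d :: rest => if !pvLooksLikeSystemAudioSource d then some d else pvLoopNonSys rest

def pick_default_mic (audio_devices : List String) : Option String :=
  if audio_devices = [] then none
  else
    match pvLoopMic audio_devices with
    | some d => some d
    | none =>
      match pvLoopNonSys audio_devices with
      | some d => some d
      | none => PySem.List.pyGet? audio_devices 0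

-- ===== PORT B =====
-- B's classifier _mic_priority: 0 = mic-like, 1 = non-system, 2 = system source
def pvMicPriority (device_name : String) : Int :=
  if pvMicTest (PySem.Str.lower device_name) then 0
  else if !pvLooksLikeSystemAudioSource device_name then 1
  else 2

def pick_default_mic_alt (audio_devices : List String) : Option String :=
  if audio_devices = [] then none
  else PySem.List.min? audio_devices pvMicPriority

-- ===== PRECONDITION & SPEC =====
def Spec_pick_default_mic (audio_devices : List String) (out : Option String) : Prop := out = pick_default_mic_alt audio_devices
instance (audio_devices : List String) (out : Option String) : Decidable (Spec_pick_default_mic audio_devices out) := by unfold Spec_pick_default_mic; infer_instance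

-- ===== CLAIM (what is proved, stated in full; the proofs are below) =====
def Claim_equal_pick_default_mic : Prop := ∀ (audio_devices : List String), Dom_pick_default_mic audio_devices → Spec_pick_default_mic audio_devices (pick_default_mic audio_devices)

-- ===== LEMMAS AND PROOFS =====

-- classifier vs. the two predicates
theorem pvMicPriority_eq_zero (d : String) :
    pvMicPriority d = 0 ↔ pvMicTest (PySem.Str.lower d) = true := by
  unfold pvMicPriority
  split_ifs with h1 h2 <;> simp_all

theorem pvMicPriority_eq_one (d : String) :
    pvMicPriority d = 1 ↔ (pvMicTest (PySem.Str.lower d) = false ∧ pvLooksLikeSystemAudioSource d = false) := by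
  unfold pvMicPriority
  split_ifs with h1 h2 <;> simp_all

theorem pvMicPriority_cases (d : String) :
    pvMicPriority d = 0 ∨ pvMicPriority d = 1 ∨ pvMicPriority d = 2 := by
  unfold pvMicPriority; split_ifs <;> simp

-- the foldl inside min?, resumed from accumulator some m, expressed through A's staged loops
theorem pvFoldMin (l : List String) : ∀ (m : String),
    List.foldl (fun acc x => match acc with
        | none => some x
        | some m => if pvMicPriority x < pvMicPriority m then some x else some m)
      (some m) l =
    some (if pvMicPriority m = 0 then m
          else match pvLoopMic l with
          | some d => d
          | none => if pvMicPriority m = 1 then m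
                    else match pvLoopNonSys l with
                    | some d => d
                    | none => m) := by
  induction l with
  | nil => intro m; simp [pvLoopMic, pvLoopNonSys]
  | cons d rest ih =>
    intro m
    simp only [List.foldl, pvLoopMic, pvLoopNonSys]
    rcases pvMicPriority_cases d with hd | hd | hd <;>
      rcases pvMicPriority_cases m with hm | hm | hm <;>
        have hdm := pvMicPriority_eq_zero d <;>
        have hdm1 := pvMicPriority_eq_one d <;>
        simp [hd, hm, ih] at hdm hdm1 ⊢ <;>
        simp_all

-- ===== VERDICT (by name: the statement is the Claim_ definition above) =====
theorem pick_default_mic_spec : Claim_equal_pick_default_mic := by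
  intro l _
  unfold Spec_pick_default_mic pick_default_mic pick_default_mic_alt
  cases l with
  | nil => simp
  | cons d rest =>
    simp only [reduceCtorEq, if_false]
    have hmin : PySem.List.min? (d :: rest) pvMicPriority =
        List.foldl (fun acc x => match acc with
            | none => some x
            | some m => if pvMicPriority x < pvMicPriority m then some x else some m)
          (some d) rest := by
      unfold PySem.List.min?
      simp only [List.foldl]
      congr 1
      funext acc x
      cases acc <;> rfl
    rw [hmin, pvFoldMin rest d]
    simp only [pvLoopMic, pvLoopNonSys]
    rcases pvMicPriority_cases d with hd | hd | hd <;>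
      have h0 := pvMicPriority_eq_zero d <;>
      have h1 := pvMicPriority_eq_one d <;>
      simp [hd] at h0 h1 <;>
      simp [hd, h0, h1, PySem.List.pyGet?, PySem.List.pyIdx?] <;>
      (try cases pvLoopMic rest) <;> (try cases pvLoopNonSys rest) <;> simp_all
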